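-- pv_equiv track=rewrite | github.com/troycomi/introgression | code/analyze/summarize_region_quality.py | index_by_reference
-- ===== SOURCE A (Python) =====
-- def index_by_reference(ref_seq, seq):
--     # return dictionary keyed by reference index, with value the
--     # corresponding index in non-reference sequence
--
--     d = {}
--     ri = 0
--     si = 0
--     for i in range(len(ref_seq)):
--         if ref_seq[i] != '-':  # gp.gap_symbol:
--             d[ri] = si
--             ri += 1
--         if seq[i] != '-':  # gp.gap_symbol:
--             si += 1
--     return d
-- ===== SOURCE B (Python) =====
-- def index_by_reference(ref_seq, seq):
--     # Same result via a two-pass decomposition: first a prefix-count table over the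
--     # non-reference sequence, then a pass over the reference that only reads the table.
--     si_at = []
--     si = 0
--     for i in range(len(ref_seq)):
--         si_at.append(si)
--         si += seq[i] != '-'
--     d = {}
--     k = 0
--     for i, c in enumerate(ref_seq):
--         if c != '-':
--             d[k] = si_at[i]
--             k += 1
--     return d
-- ===== Notes on version B (the rewrite author's own statement) =====
-- stated objective: alternative
-- what changed: Replaces A's single loop threading two counters and the dict through every position by a two-pass decomposition: a prefix-count table si_at over the non-reference sequence is built first, then a separate pass over the reference alone assigns d[k] = si_at[i] at each reference non-gap.
import Mathlib
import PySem

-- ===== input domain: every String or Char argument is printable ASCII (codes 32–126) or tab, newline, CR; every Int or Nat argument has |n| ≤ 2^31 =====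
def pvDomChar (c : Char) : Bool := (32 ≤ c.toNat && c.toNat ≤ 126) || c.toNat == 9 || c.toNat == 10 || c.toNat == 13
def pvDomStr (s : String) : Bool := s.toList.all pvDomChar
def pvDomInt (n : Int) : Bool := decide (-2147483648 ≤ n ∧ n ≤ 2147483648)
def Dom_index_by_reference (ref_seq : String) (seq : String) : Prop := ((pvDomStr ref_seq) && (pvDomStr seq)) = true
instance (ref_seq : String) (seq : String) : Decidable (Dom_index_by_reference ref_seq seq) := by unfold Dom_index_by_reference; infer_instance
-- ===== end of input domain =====

-- B replaces A's single loop threading two counters through the dict by a two-pass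
-- decomposition (prefix-count table, then a pass over the reference); objective: alternative.

-- ===== PORT A =====
-- loop body of A's single for-loop: first the ref_seq[i] branch (insert uses si before
-- any increment), then the seq[i] branch incrementing si
def stepA (st : PySem.Dict Int Int × Int × Int) (a b : Char) :
    PySem.Dict Int Int × Int × Int :=
  let st1 := if a ≠ '-' then (st.1.insert st.2.1 st.2.2, st.2.1 + 1, st.2.2) else st
  if b ≠ '-' then (st1.1, st1.2.1, st1.2.2 + 1) else st1

def index_by_reference (ref_seq : String) (seq : String) : List (Int × Int) :=
  let r := ref_seq.toList
  let s := seq.toList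
  -- for i in range(len(ref_seq)): … (seq[i] is read for every i; Pre_ keeps it in range)
  (((PySem.List.pyRange 0 (PySem.Str.len ref_seq) 1).foldl
      (fun st i => stepA st (PySem.List.pyGetD r i ' ') (PySem.List.pyGetD s i ' '))
      (PySem.Dict.empty, 0, 0)).1).items

-- ===== PORT B =====
-- body of B's first loop: si_at.append(si); si += seq[i] != '-'
def stepP (st : List Int × Int) (b : Char) : List Int × Int :=
  (st.1 ++ [st.2], st.2 + (if b ≠ '-' then 1 else 0))

-- body of B's second loop: if c != '-': d[k] = si_at[i]; k += 1
def stepB (siAt : List Int) (st : PySem.Dict Int Int × Int) (ic : Int × Char) :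
    PySem.Dict Int Int × Int :=
  if ic.2 ≠ '-' then (st.1.insert st.2 (PySem.List.pyGetD siAt ic.1 0), st.2 + 1) else st

def index_by_reference_alt (ref_seq : String) (seq : String) : List (Int × Int) :=
  let r := ref_seq.toList
  let s := seq.toList
  let siAt := ((PySem.List.pyRange 0 (PySem.Str.len ref_seq) 1).foldl
      (fun st i => stepP st (PySem.List.pyGetD s i ' '))
      ([], 0)).1
  (((PySem.List.enumerate r 0).foldl (stepB siAt) (PySem.Dict.empty, 0)).1).items

-- ===== PRECONDITION & SPEC =====
-- A reads seq[i] for every i < len(ref_seq); when seq is shorter it raises IndexError,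
-- so exactly those inputs are excluded.
def Pre_index_by_reference (ref_seq : String) (seq : String) : Prop :=
  PySem.Str.len ref_seq ≤ PySem.Str.len seq
instance (ref_seq : String) (seq : String) : Decidable (Pre_index_by_reference ref_seq seq) := by
  unfold Pre_index_by_reference; infer_instance

def pvWitness_index_by_reference : String × String := ("A-C", "AC-G")

def Spec_index_by_reference (ref_seq : String) (seq : String) (out : List (Int × Int)) : Prop := out = index_by_reference_alt ref_seq seq
instance (ref_seq : String) (seq : String) (out : List (Int × Int)) : Decidable (Spec_index_by_reference ref_seq seq out) := by unfold Spec_index_by_reference; infer_instance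

-- ===== CLAIM (what is proved, stated in full; the proofs are below) =====
def Claim_equal_index_by_reference : Prop := ∀ (ref_seq : String) (seq : String), Dom_index_by_reference ref_seq seq → Pre_index_by_reference ref_seq seq → Spec_index_by_reference ref_seq seq (index_by_reference ref_seq seq)

-- ===== LEMMAS AND PROOFS =====

-- the (ri, si) pairs emitted while walking the aligned pair list with counters ri, si
def specGold (l : List (Char × Char)) (ri si : Int) : List (Int × Int) :=
  match l with
  | [] => []
  | p :: t => (if p.1 ≠ '-' then [(ri, si)] else []) ++
      specGold t (ri + if p.1 ≠ '-' then 1 else 0) (si + if p.2 ≠ '-' then 1 else 0)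

-- prefix counts of non-gaps in the second components, starting from si
def pcz (l : List (Char × Char)) (si : Int) : List Int :=
  match l with
  | [] => []
  | p :: t => si :: pcz t (si + if p.2 ≠ '-' then 1 else 0)

lemma pyGetD_cons_shift (x : Char) (xs : List Char) (i : Int) (hi : 0 ≤ i) (c : Char) :
    PySem.List.pyGetD (x :: xs) (i + 1) c = PySem.List.pyGetD xs i c := by
  obtain ⟨n, rfl⟩ := Int.eq_ofNat_of_zero_le hi
  have h : ((n : Int) + 1) = ((n + 1 : Nat) : Int) := by push_cast; ring
  rw [h, PySem.List.pyGetD_natCast, PySem.List.pyGetD_natCast]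
  simp

lemma pyRange_zero_succ (n : Nat) :
    PySem.List.pyRange 0 ((n + 1 : Nat) : Int) 1 =
      0 :: (PySem.List.pyRange 0 (n : Int) 1).map (· + 1) := by
  rw [PySem.List.pyRange_one, PySem.List.pyRange_one]
  have h1 : (((n + 1 : Nat) : Int) - 0).toNat = n + 1 := by omega
  have h2 : (((n : Nat) : Int) - 0).toNat = n := by omega
  rw [h1, h2, List.range_succ_eq_map, List.map_cons]
  refine List.cons_eq_cons.mpr ⟨by norm_num, ?_⟩
  rw [List.map_map, List.map_map]
  apply List.map_congr_left
  intro a _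
  simp only [Function.comp_apply]
  push_cast
  ring

-- a loop 'for i in range(len(r))' reading r[i] and s[i] is the fold over zip r s
lemma foldl_pyRange_two {σ : Type} (f : σ → Char → Char → σ) (c : Char) :
    ∀ (r s : List Char) (init : σ), r.length ≤ s.length →
      (PySem.List.pyRange 0 ((r.length : Nat) : Int) 1).foldl
          (fun st i => f st (PySem.List.pyGetD r i c) (PySem.List.pyGetD s i c)) init
        = (r.zip s).foldl (fun st p => f st p.1 p.2) init := by
  intro r
  induction r with
  | nil => intro s init _; simp
  | cons a t ih =>
    intro s init hlen
    cases s with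
    | nil => simp at hlen
    | cons b u =>
      rw [List.length_cons, pyRange_zero_succ, List.foldl_cons, List.foldl_map]
      rw [PySem.List.pyGetD_zero_cons, PySem.List.pyGetD_zero_cons]
      have hcong : List.foldl
            (fun st i => f st (PySem.List.pyGetD (a :: t) (i + 1) c)
              (PySem.List.pyGetD (b :: u) (i + 1) c)) (f init a b)
            (PySem.List.pyRange 0 ((t.length : Nat) : Int) 1)
          = List.foldl
            (fun st i => f st (PySem.List.pyGetD t i c) (PySem.List.pyGetD u i c))
            (f init a b) (PySem.List.pyRange 0 ((t.length : Nat) : Int) 1) := by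
        apply PySem.List.foldl_congr_mem
        intro acc x hx
        have hx0 : 0 ≤ x := (PySem.List.mem_pyRange_one.mp hx).1
        rw [pyGetD_cons_shift a t x hx0 c, pyGetD_cons_shift b u x hx0 c]
      rw [hcong, ih u (f init a b) (by simpa using hlen)]
      simp

lemma A_items (l : List (Char × Char)) :
    ∀ (d : PySem.Dict Int Int) (ri si : Int), (∀ x ∈ d.keys, x < ri) →
      ((l.foldl (fun st p => stepA st p.1 p.2) (d, ri, si)).1).items
        = d.items ++ specGold l ri si := by
  induction l with
  | nil => intro d ri si _; simp [specGold]
  | cons p t ih =>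
    intro d ri si hk
    have hfresh : d.contains ri = false := by
      rw [PySem.Dict.contains_eq_decide_mem_keys]
      simp only [decide_eq_false_iff_not]
      intro h
      exact absurd (hk ri h) (lt_irrefl ri)
    have hkeys : (d.insert ri si).keys = d.keys ++ [ri] := by
      simp [PySem.Dict.keys, PySem.Dict.items_insert, hfresh]
    have hk' : ∀ x ∈ (d.insert ri si).keys, x < ri + 1 := by
      intro x hx
      rw [hkeys] at hx
      rcases List.mem_append.mp hx with h | h
      · have := hk x h; omega
      · simp at h; omega
    rw [List.foldl_cons]
    by_cases ha : p.1 = '-' <;> by_cases hb : p.2 = '-'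
    · have h1 : stepA (d, ri, si) p.1 p.2 = (d, ri, si) := by simp [stepA, ha, hb]
      rw [h1, ih d ri si hk]
      simp [specGold, ha, hb]
    · have h1 : stepA (d, ri, si) p.1 p.2 = (d, ri, si + 1) := by simp [stepA, ha, hb]
      rw [h1, ih d ri (si + 1) hk]
      simp [specGold, ha, hb]
    · have h1 : stepA (d, ri, si) p.1 p.2 = (d.insert ri si, ri + 1, si) := by
        simp [stepA, ha, hb]
      rw [h1, ih (d.insert ri si) (ri + 1) si hk',
        PySem.Dict.items_insert_of_not_contains (h := hfresh)]
      simp [specGold, ha, hb]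
    · have h1 : stepA (d, ri, si) p.1 p.2 = (d.insert ri si, ri + 1, si + 1) := by
        simp [stepA, ha, hb]
      rw [h1, ih (d.insert ri si) (ri + 1) (si + 1) hk',
        PySem.Dict.items_insert_of_not_contains (h := hfresh)]
      simp [specGold, ha, hb]

lemma B_table (l : List (Char × Char)) :
    ∀ (acc : List Int) (si : Int),
      (l.foldl (fun st p => stepP st p.2) (acc, si)).1 = acc ++ pcz l si := by
  induction l with
  | nil => intro acc si; simp [pcz]
  | cons p t ih =>
    intro acc si
    rw [List.foldl_cons]
    have h1 : stepP (acc, si) p.2 = (acc ++ [si], si + if p.2 ≠ '-' then 1 else 0) := rfl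
    rw [h1, ih]
    simp [pcz]

lemma B_assign (l : List (Char × Char)) :
    ∀ (siAt : List Int) (j : Nat) (si : Int) (d : PySem.Dict Int Int) (k : Int),
      (∀ x ∈ d.keys, x < k) →
      (∀ m : Nat, m < l.length → PySem.List.pyGetD siAt ((j + m : Nat) : Int) 0
          = (pcz l si).getD m 0) →
      (((PySem.List.enumerate (l.map Prod.fst) (j : Int)).foldl (stepB siAt)
          (d, k)).1).items = d.items ++ specGold l k si := by
  induction l with
  | nil => intro siAt j si d k _ _; simp [specGold, PySem.List.enumerate_nil]
  | cons p t ih =>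
    intro siAt j si d k hk hget
    have hfresh : d.contains k = false := by
      rw [PySem.Dict.contains_eq_decide_mem_keys]
      simp only [decide_eq_false_iff_not]
      intro h
      exact absurd (hk k h) (lt_irrefl k)
    have hj0 : PySem.List.pyGetD siAt ((j : Nat) : Int) 0 = si := by
      have h := hget 0 (by simp)
      simpa [pcz] using h
    have hget' : ∀ m : Nat, m < t.length →
        PySem.List.pyGetD siAt ((j + 1 + m : Nat) : Int) 0
          = (pcz t (si + if p.2 ≠ '-' then 1 else 0)).getD m 0 := by
      intro m hm
      have h := hget (m + 1) (by simp only [List.length_cons]; omega)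
      have harith : j + (m + 1) = j + 1 + m := by omega
      rw [harith] at h
      simpa [pcz] using h
    have hcast : ((j : Int) + 1) = ((j + 1 : Nat) : Int) := by push_cast; ring
    rw [List.map_cons, PySem.List.enumerate_cons, List.foldl_cons]
    by_cases ha : p.1 = '-'
    · have h1 : stepB siAt (d, k) ((j : Int), p.1) = (d, k) := by simp [stepB, ha]
      rw [h1, hcast, ih siAt (j + 1) (si + if p.2 ≠ '-' then 1 else 0) d k hk hget']
      simp [specGold, ha]
    · have h1 : stepB siAt (d, k) ((j : Int), p.1) = (d.insert k si, k + 1) := by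
        simp [stepB, ha, hj0]
      have hkeys : (d.insert k si).keys = d.keys ++ [k] := by
        simp [PySem.Dict.keys, PySem.Dict.items_insert, hfresh]
      have hk' : ∀ x ∈ (d.insert k si).keys, x < k + 1 := by
        intro x hx
        rw [hkeys] at hx
        rcases List.mem_append.mp hx with h | h
        · have := hk x h; omega
        · simp at h; omega
      rw [h1, hcast,
        ih siAt (j + 1) (si + if p.2 ≠ '-' then 1 else 0) (d.insert k si) (k + 1) hk' hget',
        PySem.Dict.items_insert_of_not_contains (h := hfresh)]
      simp [specGold, ha]

-- ===== VERDICT (by name: the statement is the Claim_ definition above) =====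
theorem index_by_reference_spec : Claim_equal_index_by_reference := by
  intro ref_seq seq _ hpre
  unfold Spec_index_by_reference
  unfold Pre_index_by_reference at hpre
  simp only [index_by_reference, index_by_reference_alt]
  set r := ref_seq.toList with hr
  set s := seq.toList with hs
  have hlen : r.length ≤ s.length := by
    rw [PySem.Str.len_eq, PySem.Str.len_eq] at hpre
    exact_mod_cast hpre
  have hstr : PySem.Str.len ref_seq = ((r.length : Nat) : Int) := by
    rw [PySem.Str.len_eq]
  rw [hstr]
  have hA := foldl_pyRange_two (fun st a b => stepA st a b) ' ' r s
    (PySem.Dict.empty, 0, 0) hlen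
  have hB := foldl_pyRange_two (fun st _ b => stepP st b) ' ' r s ([], 0) hlen
  simp only [] at hA hB
  rw [hA, hB]
  have htab : ((r.zip s).foldl (fun st p => stepP st p.2) ([], 0)).1 = pcz (r.zip s) 0 :=
    by rw [B_table]; simp
  rw [htab]
  have hfst : (r.zip s).map Prod.fst = r := List.map_fst_zip hlen
  have hassign := B_assign (r.zip s) (pcz (r.zip s) 0) 0 0 PySem.Dict.empty 0
    (by simp [PySem.Dict.keys_empty])
    (by intro m _; simp [PySem.List.pyGetD_natCast])
  rw [hfst] at hassign
  simp only [Nat.cast_zero] at hassign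
  rw [hassign, A_items (r.zip s) PySem.Dict.empty 0 0 (by simp [PySem.Dict.keys_empty])]
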